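-- pv_equiv track=rewrite | github.com/Faris999/adventofcode2022 | day25/day25.py | base5_to_snafu
-- ===== SOURCE A (Python) =====
-- def dec_to_base5(s):
--     dec = int(s)
--     if dec == 0:
--         return '0'
--     digits = []
--     while dec:
--         digits.append(str(dec % 5))
--         dec //= 5
--     return ''.join(digits[::-1])
--
-- def base5_to_snafu(s):
--     s = list(s[::-1])
--     s.append('0')
--     replacement = {'3': '=', '4': '-'}
--     for i in range(len(s)-1):
--         digit = s[i]
--         s[i] = replacement.get(digit, digit)
--         if digit in replacement:
--             s[i+1] = str(int(s[i+1]) + 1)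
--         if s[i+1] == '5':
--             s[i+1] = '4'
--             remaining = s[:i:-1]
--             x = int(''.join(remaining).lstrip('0'), base=5) + 1
--             s = s[:i+1] + list(dec_to_base5(x)[::-1]) + ['0']
--
--     return ''.join(s[::-1]).lstrip('0')
-- ===== SOURCE B (Python) =====
-- def base5_to_snafu(s):
--     # Single right-to-left pass with a 0/1 carry: O(n) instead of A's
--     # repeated tail re-parsing/rebuilding.  Characters outside '0'..'4'
--     # pass through unchanged (as in A) when no carry reaches them.
--     out = []
--     carry = 0
--     for ch in reversed(s):
--         if carry == 0 and ch not in '01234':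
--             out.append(ch)
--             continue
--         d = int(ch) + carry
--         carry = 0
--         if d == 5:
--             d = 0
--             carry = 1
--         if d <= 2:
--             out.append(str(d))
--         else:
--             out.append('=' if d == 3 else '-')
--             carry = 1
--     if carry:
--         out.append('1')
--     return ''.join(reversed(out)).lstrip('0')
-- ===== Notes on version B (the rewrite author's own statement) =====
-- stated objective: faster
-- what changed: Replaces A's fixed-length loop that, on every digit overflow, re-parses the whole remaining tail with int(...,5) and rebuilds it via dec_to_base5, by a single right-to-left pass with a 0/1 carry (non-base-5 characters pass through unchanged, as in A).
-- outside the precondition, e.g. on base5_to_snafu('93'): A returns '10=', B returns '1-='; on base5_to_snafu('0043'): A raises IndexError, B returns '10='; on base5_to_snafu('a13'): A returns 'a2=', B returns 'a2='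
import Mathlib
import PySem

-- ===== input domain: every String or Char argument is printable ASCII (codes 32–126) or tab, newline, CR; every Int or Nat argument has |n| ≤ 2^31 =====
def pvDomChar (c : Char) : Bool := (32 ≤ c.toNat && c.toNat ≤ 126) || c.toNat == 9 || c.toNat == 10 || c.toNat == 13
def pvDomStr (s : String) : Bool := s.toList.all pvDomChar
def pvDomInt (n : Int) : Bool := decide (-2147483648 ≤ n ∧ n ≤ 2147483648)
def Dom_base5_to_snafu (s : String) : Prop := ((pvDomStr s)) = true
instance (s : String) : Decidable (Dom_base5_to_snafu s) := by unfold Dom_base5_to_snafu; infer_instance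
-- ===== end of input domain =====

-- B replaces A's quadratic loop (which re-parses and rebuilds the whole remaining
-- tail on every digit overflow) by a single right-to-left pass with a 0/1 carry.
-- A mutates no caller-visible state; the equivalence is about the return value.

-- ===== PORT A =====

-- replacement.get(digit, digit) with replacement = {'3': '=', '4': '-'}
def pvRepl (d : String) : String := if d == "3" then "=" else if d == "4" then "-" else d

-- s[i+1] = str(int(s[i+1]) + 1); exact where s[i+1] is an int-literal string
-- (Python raises ValueError otherwise; such inputs are outside Pre_).
def pvIncr (t : String) : String := PySem.Int.toStr ((PySem.Int.ofStr? t).getD 0 + 1)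

-- int(cs, base=5); exact for nonempty strings of digits '0'..'4'
-- (Python raises ValueError otherwise; such inputs are outside Pre_).
def pvParse5 (cs : List Char) : Int := cs.foldl (fun a c => a * 5 + ((c.toNat : Int) - 48)) 0

-- the `while dec:` loop of dec_to_base5, low digit first (digits.append(str(dec % 5)); dec //= 5)
def pvB5loop (dec : Nat) : List Char :=
  if h : dec = 0 then [] else Char.ofNat (48 + dec % 5) :: pvB5loop (dec / 5)
decreasing_by exact Nat.div_lt_self (Nat.pos_of_ne_zero h) (by norm_num)

-- dec_to_base5; A only calls it with an int argument x ≥ 1, where this is exact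
def pvDecToBase5 (dec : Int) : String :=
  if dec == 0 then "0" else String.mk (pvB5loop dec.toNat).reverse

-- one iteration of A's `for i in range(len(s)-1)` loop body
def pvStepA (s : List String) (i : Nat) : List String :=
  let digit := s.getD i ""
  let s1 := s.set i (pvRepl digit)
  let s2 := if digit == "3" || digit == "4" then s1.set (i+1) (pvIncr (s1.getD (i+1) "")) else s1
  if s2.getD (i+1) "" == "5" then
    let s3 := s2.set (i+1) "4"
    let remaining := (s3.drop (i+1)).reverse
    let x := pvParse5 (((remaining.map String.toList).flatten).dropWhile (· == '0')) + 1
    s3.take (i+1) ++ (pvDecToBase5 x).toList.reverse.map (fun c => String.mk [c]) ++ ["0"]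
  else s2

def base5_to_snafu (s : String) : String :=
  let s0 := s.toList.reverse.map (fun c => String.mk [c]) ++ ["0"]
  let fin := (List.range (s0.length - 1)).foldl pvStepA s0
  String.mk (((fin.reverse.map String.toList).flatten).dropWhile (· == '0'))

-- ===== PORT B =====

-- one iteration of Source B's `for ch in reversed(s)` loop body
-- (`ch not in '01234'` ported as a membership test on the five characters)
def pvStepAlt (st : List String × Int) (ch : Char) : List String × Int :=
  if st.2 == 0 && !(['0', '1', '2', '3', '4'].contains ch) then
    (st.1 ++ [String.mk [ch]], 0)
  else
    let d0 := (PySem.Int.ofStr? (String.mk [ch])).getD 0 + st.2   -- d = int(ch) + carry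
    let p := if d0 == 5 then ((0 : Int), (1 : Int)) else (d0, (0 : Int))
    if p.1 ≤ 2 then (st.1 ++ [PySem.Int.toStr p.1], p.2)
    else (st.1 ++ [if p.1 == 3 then "=" else "-"], 1)

def base5_to_snafu_alt (s : String) : String :=
  let r := s.toList.reverse.foldl pvStepAlt ([], 0)
  let out := if r.2 == 0 then r.1 else r.1 ++ ["1"]               -- if carry: out.append('1')
  String.mk (((out.reverse.map String.toList).flatten).dropWhile (· == '0'))

-- ===== PRECONDITION & SPEC =====

-- Pre_ admits the two regimes where A's value is the specified one: (1) a base-5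
-- numeral (digit characters below five, no leading zero on multi-character input),
-- and (2) any string containing none of the characters three, four, five, on which
-- A replaces nothing and returns the text stripped of leading zeros.  Outside Pre_,
-- A either raises (IndexError on the cited input with leading zeros, whose
-- renormalised list becomes shorter than the fixed loop range; ValueError when a
-- carry reaches a non-digit character), or a carry into a high digit builds a
-- multi-character list slot (first cite, where A and B differ), or it returns a
-- value B matches anyway (last cite); Pre_ is conservative about that last kind.
def Pre_base5_to_snafu (s : String) : Prop :=
  ((s.toList.all (['0', '1', '2', '3', '4'].contains ·)) = true ∧
    (s.toList.length ≤ 1 ∨ s.toList.getD 0 'x' ≠ '0')) ∨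
  (s.toList.all (fun c => !(['3', '4', '5'].contains c))) = true

instance (s : String) : Decidable (Pre_base5_to_snafu s) := by
  unfold Pre_base5_to_snafu; infer_instance

def pvWitness_base5_to_snafu : String := "1423"

def Spec_base5_to_snafu (s : String) (out : String) : Prop := out = base5_to_snafu_alt s
instance (s : String) (out : String) : Decidable (Spec_base5_to_snafu s out) := by
  unfold Spec_base5_to_snafu; infer_instance

-- ===== CLAIM (what is proved, stated in full; the proofs are below) =====
def Claim_equal_base5_to_snafu : Prop :=
  ∀ (s : String), Dom_base5_to_snafu s → Pre_base5_to_snafu s →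
    Spec_base5_to_snafu s (base5_to_snafu s)

-- ===== LEMMAS AND PROOFS =====

-- proof-side helpers -------------------------------------------------------

def dchars : List Char := ['0', '1', '2', '3', '4']

def sl (l : List Char) : List String := l.map (fun c => String.mk [c])

def dig (c : Char) : Nat := c.toNat - 48

-- value of a low-digit-first digit list
def valL : List Char → Nat
  | [] => 0
  | c :: t => dig c + 5 * valL t

def snafuChar (d : Nat) : Char :=
  if d ≤ 2 then Char.ofNat (48 + d) else if d = 3 then '=' else '-'

-- abstract machine: one output digit per step, state = (output high-first, quotient)
def absStep (st : List Char × Nat) : List Char × Nat :=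
  (snafuChar (st.2 % 5) :: st.1, st.2 / 5 + if 3 ≤ st.2 % 5 then 1 else 0)

def absIter : Nat → (List Char × Nat) → (List Char × Nat)
  | 0, st => st
  | k + 1, st => absIter k (absStep st)

-- generic list index lemmas ------------------------------------------------

theorem getD_app0 {α : Type} (xs ys : List α) (d : α) :
    (xs ++ ys).getD xs.length d = ys.getD 0 d := by
  induction xs with
  | nil => rfl
  | cons a l ih => simpa using ih

theorem getD_app1 {α : Type} (xs ys : List α) (d : α) :
    (xs ++ ys).getD (xs.length + 1) d = ys.getD 1 d := by
  induction xs with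
  | nil => rfl
  | cons a l ih =>
      simp only [List.cons_append, List.length_cons, List.getD_cons_succ]
      exact ih

theorem set_app0 {α : Type} (xs ys : List α) (v : α) :
    (xs ++ ys).set xs.length v = xs ++ ys.set 0 v := by
  induction xs with
  | nil => rfl
  | cons a l ih => simp [ih]

theorem set_app1 {α : Type} (xs ys : List α) (v : α) :
    (xs ++ ys).set (xs.length + 1) v = xs ++ ys.set 1 v := by
  induction xs with
  | nil => rfl
  | cons a l ih =>
      simp only [List.cons_append, List.length_cons, List.set_cons_succ]
      rw [ih]

theorem drop_app1 {α : Type} (xs ys : List α) :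
    (xs ++ ys).drop (xs.length + 1) = ys.drop 1 := by
  induction xs with
  | nil => rfl
  | cons a l ih =>
      simp only [List.cons_append, List.length_cons, List.drop_succ_cons]
      exact ih

theorem take_app1 {α : Type} (xs ys : List α) :
    (xs ++ ys).take (xs.length + 1) = xs ++ ys.take 1 := by
  induction xs with
  | nil => rfl
  | cons a l ih =>
      simp only [List.cons_append, List.length_cons, List.take_succ_cons]
      rw [ih]

-- digit-character lemmas ----------------------------------------------------

theorem mem_dchars {c : Char} (h : c ∈ dchars) :
    c = '0' ∨ c = '1' ∨ c = '2' ∨ c = '3' ∨ c = '4' := by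
  simpa [dchars] using h

theorem dig_le {c : Char} (h : c ∈ dchars) : dig c ≤ 4 := by
  rcases mem_dchars h with rfl | rfl | rfl | rfl | rfl <;> decide

theorem repl_eq {c : Char} (h : c ∈ dchars) :
    pvRepl (String.mk [c]) = String.mk [snafuChar (dig c)] := by
  rcases mem_dchars h with rfl | rfl | rfl | rfl | rfl <;> decide

theorem cond_eq {c : Char} (h : c ∈ dchars) :
    (String.mk [c] == "3" || String.mk [c] == "4") = decide (3 ≤ dig c) := by
  rcases mem_dchars h with rfl | rfl | rfl | rfl | rfl <;> decide

theorem incr_eq {c : Char} (h : c ∈ dchars) :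
    pvIncr (String.mk [c]) = String.mk [Char.ofNat (48 + (dig c + 1))] := by
  rcases mem_dchars h with rfl | rfl | rfl | rfl | rfl <;> decide

theorem sing_ne5 {c : Char} (h : c ∈ dchars) : (String.mk [c] == "5") = false := by
  rcases mem_dchars h with rfl | rfl | rfl | rfl | rfl <;> decide

theorem chr_mem {m : Nat} (h : m ≤ 4) : Char.ofNat (48 + m) ∈ dchars := by
  interval_cases m <;> decide

theorem dig_chr {m : Nat} (h : m ≤ 9) : dig (Char.ofNat (48 + m)) = m := by
  interval_cases m <;> decide

theorem eq_four {c : Char} (h : c ∈ dchars) (h4 : dig c = 4) : c = '4' := by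
  rcases mem_dchars h with rfl | rfl | rfl | rfl | rfl <;>
    first | rfl | (exfalso; revert h4; decide)

-- valL lemmas ----------------------------------------------------------------

theorem valL_append_zero (l : List Char) : valL (l ++ ['0']) = valL l := by
  induction l with
  | nil => decide
  | cons c t ih => simp [valL, ih]

theorem valL_append_single (l : List Char) (c : Char) :
    valL (l ++ [c]) = valL l + dig c * 5 ^ l.length := by
  induction l with
  | nil => simp [valL]
  | cons a t ih => simp [valL, ih, pow_succ]; ring_nf

theorem valL_lt {l : List Char} (h : ∀ c ∈ l, c ∈ dchars) : valL l < 5 ^ l.length := by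
  induction l with
  | nil => simp [valL]
  | cons c t ih =>
      have h1 := dig_le (h c (by simp))
      have h2 := ih (fun x hx => h x (by simp [hx]))
      simp only [valL, List.length_cons, pow_succ]
      omega

theorem valL_eq_zero {l : List Char} (h : ∀ c ∈ l, c ∈ dchars) (hv : valL l = 0) :
    ∀ c ∈ l, c = '0' := by
  induction l with
  | nil => simp
  | cons c t ih =>
      simp only [valL] at hv
      have hc0 : c = '0' := by
        rcases mem_dchars (h c (by simp)) with rfl | rfl | rfl | rfl | rfl <;>
          first | rfl | (exfalso; simp [dig] at hv; all_goals omega)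
      intro x hx
      rcases List.mem_cons.mp hx with rfl | hx
      · exact hc0
      · exact ih (fun y hy => h y (by simp [hy])) (by omega) x hx

theorem valL_eq_one {l : List Char} (h : ∀ c ∈ l, c ∈ dchars) (hv : valL l = 1) :
    ∃ z, l = '1' :: z ∧ ∀ c ∈ z, c = '0' := by
  cases l with
  | nil => simp [valL] at hv
  | cons c t =>
      simp only [valL] at hv
      have hc1 : c = '1' := by
        rcases mem_dchars (h c (by simp)) with rfl | rfl | rfl | rfl | rfl <;>
          first | rfl | (exfalso; simp [dig] at hv; all_goals omega)
      refine ⟨t, by rw [hc1], ?_⟩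
      exact valL_eq_zero (fun y hy => h y (by simp [hy])) (by omega)

-- pvParse5 lemmas -------------------------------------------------------------

theorem parse5_dropWhile (l : List Char) :
    pvParse5 (l.dropWhile (· == '0')) = pvParse5 l := by
  induction l with
  | nil => rfl
  | cons c t ih =>
      by_cases hc : c = '0'
      · subst hc
        simpa [pvParse5, List.dropWhile] using ih
      · have hcb : (c == '0') = false := by simpa using hc
        simp [hcb]

theorem parse5_reverse {l : List Char} (h : ∀ c ∈ l, c ∈ dchars) :
    pvParse5 l.reverse = (valL l : Int) := by
  induction l with
  | nil => rfl
  | cons c t ih =>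
      have hc := dig_le (h c (by simp))
      have h48 : 48 ≤ c.toNat := by
        rcases mem_dchars (h c (by simp)) with rfl | rfl | rfl | rfl | rfl <;> decide
      simp only [List.reverse_cons, pvParse5, List.foldl_append, List.foldl_cons,
        List.foldl_nil, valL]
      have := ih (fun x hx => h x (by simp [hx]))
      simp only [pvParse5] at this
      rw [this]
      simp only [dig] at *
      push_cast
      omega

-- pvB5loop lemmas -------------------------------------------------------------

theorem b5_digits (m : Nat) : ∀ c ∈ pvB5loop m, c ∈ dchars := by
  induction m using Nat.strong_induction_on with
  | _ m ih =>
      rw [pvB5loop]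
      split
      · simp
      · rename_i h
        intro c hc
        rcases List.mem_cons.mp hc with rfl | hc
        · exact chr_mem (by omega)
        · exact ih (m / 5) (Nat.div_lt_self (Nat.pos_of_ne_zero h) (by norm_num)) c hc

theorem b5_val (m : Nat) : valL (pvB5loop m) = m := by
  induction m using Nat.strong_induction_on with
  | _ m ih =>
      rw [pvB5loop]
      split
      · simp [valL]; omega
      · rename_i h
        simp only [valL, dig_chr (by omega : m % 5 ≤ 9),
          ih (m / 5) (Nat.div_lt_self (Nat.pos_of_ne_zero h) (by norm_num))]
        omega

theorem b5_lt (m : Nat) : m < 5 ^ (pvB5loop m).length := by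
  have := valL_lt (b5_digits m)
  rwa [b5_val] at this

theorem b5_pos {m : Nat} (hm : 1 ≤ m) : 1 ≤ (pvB5loop m).length := by
  rw [pvB5loop]
  split
  · omega
  · simp

theorem b5_lb {m : Nat} (hm : 1 ≤ m) : 5 ^ ((pvB5loop m).length - 1) ≤ m := by
  induction m using Nat.strong_induction_on with
  | _ m ih =>
      rw [pvB5loop]
      split
      · omega
      · rename_i h
        by_cases h5 : m / 5 = 0
        · simp [pvB5loop, h5]; omega
        · have hrec := ih (m / 5) (Nat.div_lt_self (Nat.pos_of_ne_zero h) (by norm_num))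
            (Nat.pos_of_ne_zero h5)
          have hlp := b5_pos (Nat.pos_of_ne_zero h5)
          simp only [List.length_cons, Nat.add_sub_cancel]
          have hl : (pvB5loop (m / 5)).length - 1 + 1 = (pvB5loop (m / 5)).length := by omega
          have hpow : 5 ^ (pvB5loop (m / 5)).length = 5 ^ ((pvB5loop (m / 5)).length - 1) * 5 := by
            rw [← hl, pow_succ, hl]
          rw [hpow]
          omega

-- abstract-machine lemmas ------------------------------------------------------

theorem absIter_out (k : Nat) (o : List Char) (q : Nat) :
    absIter k (o, q) = ((absIter k ([], q)).1 ++ o, (absIter k ([], q)).2) := by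
  induction k generalizing o q with
  | zero => simp [absIter]
  | succ k ih =>
      simp only [absIter, absStep]
      rw [ih, ih [snafuChar (q % 5)]]
      simp

theorem absIter_q_le (k q : Nat) :
    2 * (absIter k ([], q)).2 * 5 ^ k + 1 ≤ 2 * q + 5 ^ k := by
  induction k generalizing q with
  | zero => simp [absIter]
  | succ k ih =>
      simp only [absIter, absStep]
      rw [absIter_out]
      have hq' : 5 * (q / 5 + if 3 ≤ q % 5 then 1 else 0) ≤ q + 2 := by
        split <;> omega
      have hih := ih (q / 5 + if 3 ≤ q % 5 then 1 else 0)
      set Q := (absIter k ([], q / 5 + if 3 ≤ q % 5 then 1 else 0)).2 with hQ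
      have h1 : 2 * Q * 5 ^ (k + 1) = 5 * (2 * Q * 5 ^ k) := by ring
      have h2 : (5:Nat) ^ (k + 1) = 5 * 5 ^ k := by ring
      omega

-- sl lemmas ---------------------------------------------------------------------

theorem sl_append (a b : List Char) : sl (a ++ b) = sl a ++ sl b := by
  simp [sl]

theorem sl_length (l : List Char) : (sl l).length = l.length := by
  simp [sl]

theorem sl_reverse (l : List Char) : (sl l).reverse = sl l.reverse := by
  simp [sl]

theorem flatten_sl (l : List Char) : ((sl l).map String.toList).flatten = l := by
  induction l with
  | nil => rfl
  | cons c t ih =>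
      simp only [sl, List.map_cons, List.flatten_cons] at ih ⊢
      rw [ih, show (String.mk [c]).toList = [c] from Eq.symm (String.ofList_eq.mp rfl)]
      rfl

theorem dropWhile0_zeros_append {z : List Char} (h : ∀ c ∈ z, c = '0') (l : List Char) :
    (z ++ l).dropWhile (· == '0') = l.dropWhile (· == '0') := by
  induction z with
  | nil => rfl
  | cons c t ih =>
      have hc : c = '0' := h c (by simp)
      subst hc
      simpa [List.dropWhile] using ih (fun x hx => h x (by simp [hx]))

-- the B-side loop computes the abstract machine -----------------------------------

def carryN (L : Nat) : Nat := (if 3 ≤ L % 5 then 1 else 0) + (if L = 5 then 1 else 0)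

theorem carryN_le (L : Nat) : carryN L ≤ 1 := by
  unfold carryN; split_ifs <;> omega

theorem absIter_succ (n L v : Nat) (hL : L ≤ 5) :
    absIter (n + 1) ([], L + 5 * v) =
      ((absIter n ([], v + carryN L)).1 ++ [snafuChar (L % 5)],
       (absIter n ([], v + carryN L)).2) := by
  simp only [absIter, absStep]
  have h1 : (L + 5 * v) % 5 = L % 5 := by omega
  have h2 : (L + 5 * v) / 5 = v + (if L = 5 then 1 else 0) := by split <;> omega
  rw [h1, h2]
  have h4 : ((v + if L = 5 then 1 else 0) + if 3 ≤ L % 5 then 1 else 0) = v + carryN L := by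
    unfold carryN; split_ifs <;> omega
  rw [h4, absIter_out]

theorem stepAlt_shift (out : List String) (c : Int) (ch : Char) :
    pvStepAlt (out, c) ch =
      (out ++ (pvStepAlt ([], c) ch).1, (pvStepAlt ([], c) ch).2) := by
  simp only [pvStepAlt]
  split_ifs <;> simp

theorem stepAlt_eval {ch : Char} (h : ch ∈ dchars) (c : Nat) (hc : c ≤ 1) :
    pvStepAlt ([], (c : Int)) ch =
      ([String.mk [snafuChar ((dig ch + c) % 5)]], ((carryN (dig ch + c) : Nat) : Int)) := by
  rcases mem_dchars h with rfl | rfl | rfl | rfl | rfl <;> interval_cases c <;> decide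

theorem altRun (ds : List Char) (out : List String) (c : Nat)
    (hds : ∀ ch ∈ ds, ch ∈ dchars) (hc : c ≤ 1) :
    ds.foldl pvStepAlt (out, (c : Int)) =
      (out ++ sl (absIter ds.length ([], valL ds + c)).1.reverse,
       ((absIter ds.length ([], valL ds + c)).2 : Int)) := by
  induction ds generalizing out c with
  | nil => simp [absIter, valL, sl]
  | cons ch t ih =>
      have hch := hds ch (by simp)
      have hds' : ∀ x ∈ t, x ∈ dchars := fun x hx => hds x (by simp [hx])
      have hL : dig ch + c ≤ 5 := by have := dig_le hch; omega
      have hv : valL (ch :: t) + c = (dig ch + c) + 5 * valL t := by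
        simp only [valL]; ring
      rw [List.foldl_cons, stepAlt_shift, stepAlt_eval hch c hc]
      simp only [List.length_cons]
      rw [hv, absIter_succ t.length _ (valL t) hL,
        ih (out ++ [String.mk [snafuChar ((dig ch + c) % 5)]]) (carryN (dig ch + c))
          hds' (carryN_le _)]
      simp [sl, List.append_assoc]

-- the A-side loop body, reduced on the three reachable shapes ----------------------

theorem stepA_low (os : List Char) (d0 t0 : Char) (t1 : List Char)
    (hd0 : d0 ∈ dchars) (h2 : dig d0 ≤ 2) (ht0 : t0 ∈ dchars) :
    pvStepA (sl os ++ sl (d0 :: t0 :: t1)) os.length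
      = sl (os ++ [snafuChar (dig d0)]) ++ sl (t0 :: t1) := by
  simp only [pvStepA]
  rw [show os.length = (sl os).length from (sl_length os).symm,
    show sl (d0 :: t0 :: t1) = String.mk [d0] :: String.mk [t0] :: sl t1 from rfl,
    getD_app0]
  simp only [List.getD_cons_zero]
  rw [set_app0]
  simp only [List.set_cons_zero]
  rw [cond_eq hd0, show decide (3 ≤ dig d0) = false from by simp; omega]
  simp only [Bool.false_eq_true, if_false]
  rw [getD_app1]
  simp only [List.getD_cons_succ, List.getD_cons_zero]
  rw [sing_ne5 ht0]
  simp only [Bool.false_eq_true, if_false]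
  rw [repl_eq hd0]
  simp [sl, List.append_assoc]

theorem stepA_carry (os : List Char) (d0 t0 : Char) (t1 : List Char)
    (hd0 : d0 ∈ dchars) (h3 : 3 ≤ dig d0) (ht0 : t0 ∈ dchars) (ht03 : dig t0 ≤ 3) :
    pvStepA (sl os ++ sl (d0 :: t0 :: t1)) os.length
      = sl (os ++ [snafuChar (dig d0)]) ++ sl (Char.ofNat (48 + (dig t0 + 1)) :: t1) := by
  simp only [pvStepA]
  rw [show os.length = (sl os).length from (sl_length os).symm,
    show sl (d0 :: t0 :: t1) = String.mk [d0] :: String.mk [t0] :: sl t1 from rfl,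
    getD_app0]
  simp only [List.getD_cons_zero]
  rw [set_app0]
  simp only [List.set_cons_zero]
  rw [cond_eq hd0, show decide (3 ≤ dig d0) = true from by simp; omega]
  simp only [if_true]
  rw [getD_app1]
  simp only [List.getD_cons_succ, List.getD_cons_zero]
  rw [set_app1]
  simp only [List.set_cons_succ, List.set_cons_zero]
  rw [incr_eq ht0, getD_app1]
  simp only [List.getD_cons_succ, List.getD_cons_zero]
  rw [sing_ne5 (chr_mem (by omega))]
  simp only [Bool.false_eq_true, if_false]
  rw [repl_eq hd0]
  simp [sl, List.append_assoc]

theorem stepA_renorm (os : List Char) (d0 : Char) (t1 : List Char)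
    (hd0 : d0 ∈ dchars) (h3 : 3 ≤ dig d0) (ht1 : ∀ c ∈ t1, c ∈ dchars) :
    pvStepA (sl os ++ sl (d0 :: '4' :: t1)) os.length
      = sl (os ++ [snafuChar (dig d0)]) ++ sl (pvB5loop (5 + 5 * valL t1) ++ ['0']) := by
  simp only [pvStepA]
  rw [show os.length = (sl os).length from (sl_length os).symm,
    show sl (d0 :: '4' :: t1) = String.mk [d0] :: String.mk ['4'] :: sl t1 from rfl,
    getD_app0]
  simp only [List.getD_cons_zero]
  rw [set_app0]
  simp only [List.set_cons_zero]
  rw [cond_eq hd0, show decide (3 ≤ dig d0) = true from by simp; omega]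
  simp only [if_true]
  rw [getD_app1]
  simp only [List.getD_cons_succ, List.getD_cons_zero]
  rw [set_app1]
  simp only [List.set_cons_succ, List.set_cons_zero]
  rw [incr_eq (show ('4' : Char) ∈ dchars from by decide), getD_app1]
  simp only [List.getD_cons_succ, List.getD_cons_zero]
  rw [show (String.mk [Char.ofNat (48 + (dig '4' + 1))] == "5") = true from by decide]
  simp only [if_true]
  rw [set_app1]
  simp only [List.set_cons_succ, List.set_cons_zero]
  rw [drop_app1]
  simp only [List.drop_succ_cons, List.drop_zero]
  rw [take_app1]
  simp only [List.take_succ_cons, List.take_zero]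
  have hrem : (((("4" : String) :: sl t1).reverse.map String.toList).flatten) = t1.reverse ++ ['4'] := by
    simp only [List.reverse_cons, sl_reverse, List.map_append, List.flatten_append, flatten_sl]
    rfl
  rw [hrem, show t1.reverse ++ ['4'] = ('4' :: t1).reverse from by simp,
    parse5_dropWhile, parse5_reverse (by
      intro c hcm
      rcases List.mem_cons.mp hcm with rfl | hcm
      · decide
      · exact ht1 c hcm)]
  have hx : ((valL ('4' :: t1) : Int)) + 1 = ((5 + 5 * valL t1 : Nat) : Int) := by
    have : valL ('4' :: t1) = 4 + 5 * valL t1 := by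
      simp only [valL]; rw [show dig '4' = 4 from by decide]
    rw [this]; push_cast; ring
  rw [hx]
  have hne : (((5 + 5 * valL t1 : Nat) : Int)) ≠ 0 := by positivity
  simp only [pvDecToBase5, beq_iff_eq, if_neg hne, Int.toNat_natCast]
  rw [show (String.mk (pvB5loop (5 + 5 * valL t1)).reverse).toList
        = (pvB5loop (5 + 5 * valL t1)).reverse from Eq.symm (String.ofList_eq.mp rfl)]
  rw [List.reverse_reverse, repl_eq hd0,
    show ("0" : String) = String.mk ['0'] from by decide]
  simp [sl, List.append_assoc]

-- the A-side loop computes the abstract machine ------------------------------------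

theorem Arun (k : Nat) (os r : List Char)
    (hr : ∀ c ∈ r, c ∈ dchars) (hlen : k + 1 ≤ r.length)
    (hlb : k ≤ 1 ∨ 5 ^ (r.length - 2) ≤ valL r) :
    ∃ rf, (List.range' os.length k 1).foldl pvStepA (sl os ++ sl r)
        = sl (os ++ (absIter k ([], valL r)).1.reverse) ++ sl rf
      ∧ (∀ c ∈ rf, c ∈ dchars) ∧ 1 ≤ rf.length ∧ valL rf = (absIter k ([], valL r)).2 := by
  induction k generalizing os r with
  | zero =>
      refine ⟨r, ?_, hr, by omega, rfl⟩
      simp [absIter]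
  | succ k ih =>
      rcases r with _ | ⟨d0, t⟩
      · simp at hlen
      rcases t with _ | ⟨t0, t1⟩
      · simp at hlen
      have hd0 : d0 ∈ dchars := hr d0 (by simp)
      have ht0 : t0 ∈ dchars := hr t0 (by simp)
      have ht1 : ∀ c ∈ t1, c ∈ dchars := fun c hc => hr c (by simp [hc])
      have hdd0 := dig_le hd0
      have hdt0 := dig_le ht0
      have hq : valL (d0 :: t0 :: t1) = dig d0 + 5 * dig t0 + 25 * valL t1 := by
        simp only [valL]; ring
      have hlen' : k + 2 ≤ t1.length + 2 := by simpa using hlen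
      rw [List.range'_succ, List.foldl_cons]
      by_cases h2 : dig d0 ≤ 2
      · -- no carry out of this digit
        rw [stepA_low os d0 t0 t1 hd0 h2 ht0]
        have habs : absIter (k + 1) ([], valL (d0 :: t0 :: t1))
            = ((absIter k ([], valL (t0 :: t1))).1 ++ [snafuChar (dig d0)],
               (absIter k ([], valL (t0 :: t1))).2) := by
          have hv : valL (d0 :: t0 :: t1) = dig d0 + 5 * valL (t0 :: t1) := by
            simp only [valL]
          rw [hv, absIter_succ k (dig d0) (valL (t0 :: t1)) (by omega),
            show carryN (dig d0) = 0 from by unfold carryN; split_ifs <;> omega,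
            show dig d0 % 5 = dig d0 from by omega]
          simp
        obtain ⟨rf, heq, hrf, hrflen, hrfv⟩ := ih (os ++ [snafuChar (dig d0)]) (t0 :: t1)
            (by intro c hc
                rcases List.mem_cons.mp hc with rfl | hc
                · exact ht0
                · exact ht1 c hc)
            (by simp; omega)
            (by by_cases hk : k ≤ 1
                · exact Or.inl hk
                · right
                  have hlb' := hlb.resolve_left (by omega)
                  simp only [List.length_cons] at hlb' ⊢
                  obtain ⟨m, hm⟩ : ∃ m, t1.length = m + 1 := ⟨t1.length - 1, by omega⟩
                  rw [hm] at hlb' ⊢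
                  rw [show m + 1 + 1 + 1 - 2 = m + 1 from by omega] at hlb'
                  rw [show m + 1 + 1 - 2 = m from by omega]
                  have hp : (5 : Nat) ^ (m + 1) = 5 * 5 ^ m := by ring
                  rw [hq] at hlb'
                  have hv2 : valL (t0 :: t1) = dig t0 + 5 * valL t1 := by simp only [valL]
                  rw [hv2]
                  omega)
        rw [show (os ++ [snafuChar (dig d0)]).length = os.length + 1 from by simp] at heq
        refine ⟨rf, ?_, hrf, hrflen, ?_⟩
        · rw [heq, habs]
          simp [List.append_assoc]
        · rw [habs]
          exact hrfv
      · have h3 : 3 ≤ dig d0 := by omega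
        by_cases h44 : dig t0 = 4
        · -- carry makes the next slot '5': renormalisation
          have ht0e : t0 = '4' := eq_four ht0 h44
          subst ht0e
          rw [stepA_renorm os d0 t1 hd0 h3 ht1]
          have hm5 : 1 ≤ 5 + 5 * valL t1 := by omega
          have habs : absIter (k + 1) ([], valL (d0 :: '4' :: t1))
              = ((absIter k ([], valL (pvB5loop (5 + 5 * valL t1) ++ ['0']))).1
                    ++ [snafuChar (dig d0)],
                 (absIter k ([], valL (pvB5loop (5 + 5 * valL t1) ++ ['0']))).2) := by
            have hv : valL (d0 :: '4' :: t1) = dig d0 + 5 * (4 + 5 * valL t1) := by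
              simp only [valL, show dig '4' = 4 from by decide]
              try ring
            rw [hv, absIter_succ k (dig d0) (4 + 5 * valL t1) (by omega)]
            rw [show carryN (dig d0) = 1 from by unfold carryN; split_ifs <;> omega]
            rw [show dig d0 % 5 = dig d0 from by omega]
            rw [valL_append_zero, b5_val]
            rw [show 4 + 5 * valL t1 + 1 = 5 + 5 * valL t1 from by omega]
          obtain ⟨rf, heq, hrf, hrflen, hrfv⟩ := ih (os ++ [snafuChar (dig d0)])
              (pvB5loop (5 + 5 * valL t1) ++ ['0'])
              (by intro c hc
                  rcases List.mem_append.mp hc with hc | hc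
                  · exact b5_digits _ c hc
                  · simp at hc; subst hc; decide)
              (by -- k + 1 ≤ length
                  simp only [List.length_append, List.length_cons, List.length_nil]
                  by_cases hk : k ≤ 1
                  · have := b5_pos hm5
                    omega
                  · have hlb' := hlb.resolve_left (by omega)
                    simp only [List.length_cons] at hlb'
                    rw [show t1.length + 1 + 1 - 2 = t1.length from by omega, hq] at hlb'
                    obtain ⟨j, hj⟩ : ∃ j, k = j + 2 := ⟨k - 2, by omega⟩
                    have hpk : 5 ^ k ≤ 5 ^ t1.length :=
                      Nat.pow_le_pow_right (by norm_num) (by omega)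
                    have hpkk : (5 : Nat) ^ k = 25 * 5 ^ j := by rw [hj]; ring
                    have hv1 : 5 ^ j ≤ valL t1 := by omega
                    have hmlb : 5 * 5 ^ j < 5 + 5 * valL t1 := by omega
                    have hlt := b5_lt (5 + 5 * valL t1)
                    have : (5 : Nat) ^ (j + 1) < 5 ^ (pvB5loop (5 + 5 * valL t1)).length := by
                      calc (5:Nat) ^ (j+1) = 5 * 5 ^ j := by ring
                      _ < 5 + 5 * valL t1 := hmlb
                      _ < _ := hlt
                    have := (Nat.pow_lt_pow_iff_right (by norm_num : 1 < 5)).mp this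
                    omega)
              (Or.inr (by
                  simp only [List.length_append, List.length_cons, List.length_nil]
                  rw [valL_append_zero, b5_val,
                    show (pvB5loop (5 + 5 * valL t1)).length + 1 - 2
                        = (pvB5loop (5 + 5 * valL t1)).length - 1 from by omega]
                  exact b5_lb hm5))
          rw [show (os ++ [snafuChar (dig d0)]).length = os.length + 1 from by simp] at heq
          refine ⟨rf, ?_, hrf, hrflen, ?_⟩
          · rw [heq, habs]
            simp [List.append_assoc]
          · rw [habs]
            exact hrfv
        · -- ordinary carry into the next digit
          have hdt03 : dig t0 ≤ 3 := by omega
          rw [stepA_carry os d0 t0 t1 hd0 h3 ht0 hdt03]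
          have hchr : dig (Char.ofNat (48 + (dig t0 + 1))) = dig t0 + 1 :=
            dig_chr (by omega)
          have habs : absIter (k + 1) ([], valL (d0 :: t0 :: t1))
              = ((absIter k ([], valL (Char.ofNat (48 + (dig t0 + 1)) :: t1))).1
                    ++ [snafuChar (dig d0)],
                 (absIter k ([], valL (Char.ofNat (48 + (dig t0 + 1)) :: t1))).2) := by
            have hv : valL (d0 :: t0 :: t1) = dig d0 + 5 * valL (t0 :: t1) := by
              simp only [valL]
            have hv' : valL (Char.ofNat (48 + (dig t0 + 1)) :: t1)
                = valL (t0 :: t1) + 1 := by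
              simp only [valL, hchr]; ring
            rw [hv, absIter_succ k (dig d0) (valL (t0 :: t1)) (by omega),
              show carryN (dig d0) = 1 from by unfold carryN; split_ifs <;> omega,
              show dig d0 % 5 = dig d0 from by omega, hv']
          obtain ⟨rf, heq, hrf, hrflen, hrfv⟩ := ih (os ++ [snafuChar (dig d0)])
              (Char.ofNat (48 + (dig t0 + 1)) :: t1)
              (by intro c hc
                  rcases List.mem_cons.mp hc with rfl | hc
                  · exact chr_mem (by omega)
                  · exact ht1 c hc)
              (by simp; omega)
              (by by_cases hk : k ≤ 1
                  · exact Or.inl hk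
                  · right
                    have hlb' := hlb.resolve_left (by omega)
                    simp only [List.length_cons] at hlb' ⊢
                    obtain ⟨m, hm⟩ : ∃ m, t1.length = m + 1 := ⟨t1.length - 1, by omega⟩
                    rw [hm] at hlb' ⊢
                    rw [show m + 1 + 1 + 1 - 2 = m + 1 from by omega] at hlb'
                    rw [show m + 1 + 1 - 2 = m from by omega]
                    have hp : (5 : Nat) ^ (m + 1) = 5 * 5 ^ m := by ring
                    rw [hq] at hlb'
                    have hv2 : valL (Char.ofNat (48 + (dig t0 + 1)) :: t1)
                        = dig t0 + 1 + 5 * valL t1 := by simp only [valL, hchr]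
                    rw [hv2]
                    omega)
          rw [show (os ++ [snafuChar (dig d0)]).length = os.length + 1 from by simp] at heq
          refine ⟨rf, ?_, hrf, hrflen, ?_⟩
          · rw [heq, habs]
            simp [List.append_assoc]
          · rw [habs]
            exact hrfv

-- ===== VERDICT (by name: the statement is the Claim_ definition above) =====
-- the pass-through regime: no '3', '4' or '5' anywhere --------------------------

theorem sing_ne {c d : Char} (h : c ≠ d) :
    (String.mk [c] == String.mk [d]) = false := by
  apply beq_eq_false_iff_ne.mpr
  intro he
  apply h
  have := congrArg String.toList he
  rw [show (String.mk [c]).toList = [c] from Eq.symm (String.ofList_eq.mp rfl),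
    show (String.mk [d]).toList = [d] from Eq.symm (String.ofList_eq.mp rfl)] at this
  exact (List.cons.inj this).1

theorem stepA_pass (os : List Char) (c0 c1 : Char) (t : List Char)
    (h0 : c0 ≠ '3' ∧ c0 ≠ '4') (h1 : c1 ≠ '5') :
    pvStepA (sl os ++ sl (c0 :: c1 :: t)) os.length
      = sl (os ++ [c0]) ++ sl (c1 :: t) := by
  simp only [pvStepA]
  rw [show os.length = (sl os).length from (sl_length os).symm,
    show sl (c0 :: c1 :: t) = String.mk [c0] :: String.mk [c1] :: sl t from rfl,
    getD_app0]
  simp only [List.getD_cons_zero]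
  rw [set_app0]
  simp only [List.set_cons_zero]
  rw [show ("3" : String) = String.mk ['3'] from by decide,
    show ("4" : String) = String.mk ['4'] from by decide,
    sing_ne h0.1, sing_ne h0.2]
  simp only [Bool.or_self, Bool.false_eq_true, if_false]
  rw [getD_app1]
  simp only [List.getD_cons_succ, List.getD_cons_zero]
  rw [show ("5" : String) = String.mk ['5'] from by decide, sing_ne h1]
  simp only [Bool.false_eq_true, if_false]
  rw [show pvRepl (String.mk [c0]) = String.mk [c0] from by
    simp only [pvRepl,
      show ("3" : String) = String.mk ['3'] from by decide,
      show ("4" : String) = String.mk ['4'] from by decide,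
      sing_ne h0.1, sing_ne h0.2]
    simp]
  simp [sl, List.append_assoc]

theorem ArunPass (k : Nat) (os r : List Char)
    (hr : ∀ c ∈ r, c ≠ '3' ∧ c ≠ '4' ∧ c ≠ '5') (hlen : k + 1 ≤ r.length) :
    (List.range' os.length k 1).foldl pvStepA (sl os ++ sl r) = sl os ++ sl r := by
  induction k generalizing os r with
  | zero => rfl
  | succ k ih =>
      rcases r with _ | ⟨c0, t⟩
      · simp at hlen
      rcases t with _ | ⟨c1, t1⟩
      · simp at hlen
      have h0 := hr c0 (by simp)
      have h1 := hr c1 (by simp)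
      rw [List.range'_succ, List.foldl_cons,
        stepA_pass os c0 c1 t1 ⟨h0.1, h0.2.1⟩ h1.2.2]
      rw [show os.length + 1 = (os ++ [c0]).length from by simp]
      rw [ih (os ++ [c0]) (c1 :: t1) (fun c hc => hr c (by simp at hc ⊢; tauto))
        (by simp at hlen ⊢; omega)]
      simp [sl, List.append_assoc]

theorem altRunPass (ds : List Char) (out : List String)
    (hds : ∀ c ∈ ds, c ≠ '3' ∧ c ≠ '4' ∧ c ≠ '5') :
    ds.foldl pvStepAlt (out, (0 : Int)) = (out ++ sl ds, 0) := by
  induction ds generalizing out with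
  | nil => simp [sl]
  | cons ch t ih =>
      have hch := hds ch (by simp)
      have hstep : pvStepAlt (out, (0 : Int)) ch = (out ++ [String.mk [ch]], 0) := by
        by_cases hc : ch ∈ dchars
        · rcases mem_dchars hc with rfl | rfl | rfl | rfl | rfl
          · rw [stepAlt_shift, show pvStepAlt ([], (0 : Int)) '0'
                = ([String.mk ['0']], 0) from by decide]
          · rw [stepAlt_shift, show pvStepAlt ([], (0 : Int)) '1'
                = ([String.mk ['1']], 0) from by decide]
          · rw [stepAlt_shift, show pvStepAlt ([], (0 : Int)) '2'
                = ([String.mk ['2']], 0) from by decide]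
          · exact absurd rfl hch.1
          · exact absurd rfl hch.2.1
        · have hcf : (['0', '1', '2', '3', '4'].contains ch) = false := by
            rw [List.contains_eq_mem]
            simpa [dchars] using hc
          simp only [pvStepAlt]
          rw [hcf]
          norm_num
      rw [List.foldl_cons, hstep, ih (out ++ [String.mk [ch]])
        (fun c hc => hds c (by simp [hc]))]
      simp [sl, List.append_assoc]

-- final assembly -----------------------------------------------------------------

theorem base5_to_snafu_spec : Claim_equal_base5_to_snafu := by
  intro s _hdom hpre
  rcases hpre with ⟨hall0, hlz⟩ | hpass
  swap
  · -- pass-through regime: A touches nothing, both return the text stripped of '0'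
    unfold Spec_base5_to_snafu
    have hnc : ∀ c ∈ s.toList, c ≠ '3' ∧ c ≠ '4' ∧ c ≠ '5' := by
      intro c hc
      have := List.all_eq_true.mp hpass c hc
      simpa using this
    have hA2 : base5_to_snafu s = String.mk (s.toList.dropWhile (· == '0')) := by
      simp only [base5_to_snafu]
      rw [show s.toList.reverse.map (fun c => String.mk [c]) ++ ["0"]
            = sl (s.toList.reverse ++ ['0']) from by
          simp [sl, show ("0" : String) = String.mk ['0'] from by decide]]
      rw [show (sl (s.toList.reverse ++ ['0'])).length - 1 = s.toList.reverse.length from by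
          rw [sl_length]; simp]
      rw [List.range_eq_range', show (0 : Nat) = ([] : List Char).length from rfl,
        show sl (s.toList.reverse ++ ['0']) = sl [] ++ sl (s.toList.reverse ++ ['0']) from by
          simp [sl]]
      rw [ArunPass s.toList.reverse.length [] (s.toList.reverse ++ ['0'])
        (by intro c hc
            rcases List.mem_append.mp hc with hc | hc
            · exact hnc c (List.mem_reverse.mp hc)
            · simp at hc; subst hc; refine ⟨by decide, by decide, by decide⟩)
        (by simp)]
      rw [show (sl [] : List String) = [] from rfl, List.nil_append,
        sl_reverse, flatten_sl, List.reverse_append, List.reverse_reverse]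
      rw [show (['0'].reverse : List Char) = ['0'] from rfl]
      rfl
    have hB2 : base5_to_snafu_alt s = String.mk (s.toList.dropWhile (· == '0')) := by
      simp only [base5_to_snafu_alt]
      rw [altRunPass s.toList.reverse []
        (fun c hc => hnc c (List.mem_reverse.mp hc))]
      simp only [List.nil_append]
      rw [show (((0 : Int)) == 0) = true from by decide]
      simp only [if_true]
      rw [sl_reverse, List.reverse_reverse, flatten_sl]
    rw [hA2, hB2]
  have hall : ∀ c ∈ s.toList, c ∈ dchars := by
    intro c hc
    have := List.all_eq_true.mp hall0 c hc
    simpa [dchars] using this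
  unfold Spec_base5_to_snafu
  have hds : ∀ c ∈ s.toList.reverse, c ∈ dchars := by
    intro c hc
    exact hall c (List.mem_reverse.mp hc)
  -- A side: run the loop invariant
  obtain ⟨rf, heq, hrf, hrflen, hrfv⟩ := Arun s.toList.reverse.length []
      (s.toList.reverse ++ ['0'])
      (by intro c hc
          rcases List.mem_append.mp hc with hc | hc
          · exact hds c hc
          · simp at hc; subst hc; decide)
      (by simp)
      (by by_cases hn1 : s.toList.reverse.length ≤ 1
          · exact Or.inl hn1
          · right
            rw [valL_append_zero]
            have hlen2 : 2 ≤ s.toList.length := by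
              rw [List.length_reverse] at hn1; omega
            have hne : s.toList.getD 0 'x' ≠ '0' := by
              rcases hlz with hlz | hlz
              · omega
              · exact hlz
            rcases hsl : s.toList with _ | ⟨h0c, rest⟩
            · rw [hsl] at hlen2; simp at hlen2
            · have hne0 : h0c ≠ '0' := by rw [hsl] at hne; simpa using hne
              have hmem : h0c ∈ dchars := hall h0c (by rw [hsl]; simp)
              have hd1 : 1 ≤ dig h0c := by
                rcases mem_dchars hmem with rfl | rfl | rfl | rfl | rfl <;>
                  first | (exact absurd rfl hne0) | decide
              rw [List.reverse_cons, valL_append_single]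
              rw [show ((rest.reverse ++ [h0c]) ++ ['0']).length - 2
                    = rest.reverse.length from by simp]
              have hmul := Nat.mul_le_mul_right (5 ^ rest.reverse.length) hd1
              omega)
  rw [valL_append_zero] at heq hrfv
  set O := (absIter s.toList.reverse.length ([], valL s.toList.reverse)).1 with hO
  set Q := (absIter s.toList.reverse.length ([], valL s.toList.reverse)).2 with hQdef
  -- rewrite port A's body
  have hA : base5_to_snafu s
      = String.mk ((rf.reverse ++ O).dropWhile (· == '0')) := by
    simp only [base5_to_snafu]
    rw [show s.toList.reverse.map (fun c => String.mk [c]) ++ ["0"]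
          = sl (s.toList.reverse ++ ['0']) from by
        simp [sl, show ("0" : String) = String.mk ['0'] from by decide]]
    rw [show (sl (s.toList.reverse ++ ['0'])).length - 1 = s.toList.reverse.length from by
        rw [sl_length]; simp]
    rw [List.range_eq_range', show (0 : Nat) = ([] : List Char).length from rfl,
      show sl (s.toList.reverse ++ ['0']) = sl [] ++ sl (s.toList.reverse ++ ['0']) from by
        simp [sl]]
    rw [heq]
    simp only [List.nil_append]
    rw [← sl_append, sl_reverse, flatten_sl, List.reverse_append, List.reverse_reverse]
  -- B side: run the fold characterisation
  have halt := altRun s.toList.reverse [] 0 hds (by omega)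
  simp only [Nat.cast_zero, add_zero, List.nil_append] at halt
  have hB : base5_to_snafu_alt s
      = String.mk ((((if (Q : Int) == 0 then sl O.reverse
            else sl O.reverse ++ ["1"]).reverse.map String.toList).flatten).dropWhile
              (· == '0')) := by
    simp only [base5_to_snafu_alt]
    rw [halt]
  -- the final quotient is 0 or 1
  have hqle := absIter_q_le s.toList.reverse.length (valL s.toList.reverse)
  have hlt : valL s.toList.reverse < 5 ^ s.toList.reverse.length := valL_lt hds
  rw [← hQdef] at hqle
  have hQ1 : Q ≤ 1 := by
    by_contra hcon
    have hcon2 : 2 ≤ Q := by omega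
    have h4 : 4 * 5 ^ s.toList.reverse.length ≤ 2 * Q * 5 ^ s.toList.reverse.length :=
      Nat.mul_le_mul_right _ (by omega)
    have hw : 2 * Q * 5 ^ s.toList.reverse.length
        = 2 * (Q * 5 ^ s.toList.reverse.length) := by ring
    rw [hw] at hqle h4
    omega
  rcases Nat.le_one_iff_eq_zero_or_eq_one.mp hQ1 with hQv | hQv
  · -- no final carry: the leftover slots are all '0'
    rw [hA, hB, hQv]
    have hz : ∀ c ∈ rf.reverse, c = '0' := fun c hc =>
      valL_eq_zero hrf (by rw [hrfv, hQv]) c (List.mem_reverse.mp hc)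
    rw [dropWhile0_zeros_append hz,
      show (((0 : Nat) : Int) == 0) = true from by decide]
    simp only [if_true]
    rw [sl_reverse, List.reverse_reverse, flatten_sl]
  · -- final carry: the leftover slots are '1' followed by zeros
    rw [hA, hB, hQv,
      show (((1 : Nat) : Int) == 0) = false from by decide]
    simp only [Bool.false_eq_true, if_false]
    obtain ⟨z, hzeq, hz⟩ := valL_eq_one hrf (by rw [hrfv, hQv])
    rw [hzeq, List.reverse_cons, List.append_assoc, List.singleton_append,
      dropWhile0_zeros_append (fun c hc => hz c (List.mem_reverse.mp hc)),
      List.reverse_append, sl_reverse, List.reverse_reverse, List.map_append,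
      List.flatten_append, flatten_sl]
    rw [show (((["1"] : List String).reverse).map String.toList).flatten = ['1'] from by decide]
    rfl
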